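-- pv_equiv track=rewrite | github.com/olbogdan/Algorithms | Python/AlgoBootcamp/leetcode/medium/3152. Special Array II.py | getLongestPostfix
-- ===== SOURCE A (Python) =====
-- from typing import List
--
-- def getLongestPostfix(nums: List[int]) -> List[bool]:
--     res = []
--     res.append(0)
--     prevNumer = nums[-1]
--     for i in reversed(range(0, len(nums) - 1)):
--         num = nums[i]
--         n1Even = (prevNumer % 2 == 0)
--         n2Even = (num % 2 == 0)
--         if (n1Even and n2Even) or (not n1Even and not n2Even):
--             res.append(0)
--         else:
--             res.append(1 + res[-1])
--         prevNumer = num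
--     return list(reversed(res))
-- ===== SOURCE B (Python) =====
-- def getLongestPostfix(nums):
--     # Forward segment decomposition: for each maximal alternating-parity run
--     # nums[start:k], emit the countdown k-start-1, ..., 1, 0, then continue at k.
--     res = []
--     start = 0
--     n = len(nums)
--     while start < n:
--         k = start + 1
--         while k < n and nums[k] % 2 != nums[k - 1] % 2:
--             k += 1
--         res.extend(range(k - start - 1, -1, -1))
--         start = k
--     return res
-- ===== Notes on version B (the rewrite author's own statement) =====
-- stated objective: alternative
-- what changed: Replaced A's backward scan that accumulates run lengths and reverses at the end with a forward segment decomposition: strip each maximal alternating-parity run and emit its countdown range directly, recursing on the rest.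
import Mathlib
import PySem

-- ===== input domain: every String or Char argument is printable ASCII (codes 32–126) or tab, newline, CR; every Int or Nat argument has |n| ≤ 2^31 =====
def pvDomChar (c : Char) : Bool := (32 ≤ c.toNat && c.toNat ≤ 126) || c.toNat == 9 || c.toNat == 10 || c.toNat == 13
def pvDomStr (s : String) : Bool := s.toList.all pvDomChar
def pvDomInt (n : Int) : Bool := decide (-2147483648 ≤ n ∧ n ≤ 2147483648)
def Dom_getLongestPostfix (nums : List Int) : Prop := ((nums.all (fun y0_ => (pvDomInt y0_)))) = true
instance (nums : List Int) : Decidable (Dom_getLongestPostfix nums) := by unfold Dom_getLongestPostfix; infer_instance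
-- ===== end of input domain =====

-- B is a different decomposition of the same function: a forward segment scan that
-- strips each maximal alternating-parity run and emits its countdown, instead of A's
-- backward accumulation with a final reverse. Equivalence of the RETURN value is proved
-- on nonempty lists (A raises IndexError on the empty list; B naturally returns [] there).

-- ===== PORT A =====
def getLongestPostfix (nums : List Int) : List Int :=
  match PySem.List.pyGet? nums (-1) with
  | none => []   -- nums[-1] raises IndexError on []: excluded by Pre_
  | some last =>
    let st := ((PySem.List.pyRange 0 (PySem.List.len nums - 1) 1).reverse).foldl
      (fun (st : List Int × Int) (i : Int) =>
        let res := st.1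
        let prevNumer := st.2
        let num := PySem.List.pyGetD nums i 0
        let n1Even : Bool := PySem.Int.mod prevNumer 2 == 0
        let n2Even : Bool := PySem.Int.mod num 2 == 0
        let res' := if (n1Even && n2Even) || (!n1Even && !n2Even)
          then res ++ [0]
          else res ++ [1 + PySem.List.pyGetD res (-1) 0]
        (res', num))
      ([(0 : Int)], last)
    st.1.reverse

-- ===== PORT B =====
-- while k < len(nums) and nums[k] % 2 != nums[k-1] % 2: k += 1
def pvFindK (nums : List Int) (k : Nat) : Nat :=
  if _h : k < nums.length then
    if PySem.Int.mod (PySem.List.pyGetD nums (k : Int) 0) 2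
        ≠ PySem.Int.mod (PySem.List.pyGetD nums ((k : Int) - 1) 0) 2
    then pvFindK nums (k + 1)
    else k
  else k
termination_by nums.length - k

theorem pvFindK_ge (nums : List Int) (k : Nat) : k ≤ pvFindK nums k := by
  fun_induction pvFindK with
  | case1 => omega
  | case2 => omega
  | case3 => omega

def pvAltLoop (nums : List Int) (start : Nat) (res : List Int) : List Int :=
  if _h : start < nums.length then
    let k := pvFindK nums (start + 1)
    pvAltLoop nums k (res ++ PySem.List.pyRange ((k : Int) - (start : Int) - 1) (-1) (-1))
  else res
termination_by nums.length - start
decreasing_by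
  have := pvFindK_ge nums (start + 1)
  omega

def getLongestPostfix_alt (nums : List Int) : List Int := pvAltLoop nums 0 []

-- ===== PRECONDITION & SPEC =====
-- Pre_ excludes only the empty list, on which A raises IndexError (nums[-1]).
def Pre_getLongestPostfix (nums : List Int) : Prop := nums ≠ []
instance (nums : List Int) : Decidable (Pre_getLongestPostfix nums) := by
  unfold Pre_getLongestPostfix; infer_instance

def pvWitness_getLongestPostfix : List Int := [2, 1, 4, 4, 5]

def Spec_getLongestPostfix (nums : List Int) (out : List Int) : Prop := out = getLongestPostfix_alt nums
instance (nums : List Int) (out : List Int) : Decidable (Spec_getLongestPostfix nums out) := by unfold Spec_getLongestPostfix; infer_instance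

-- ===== CLAIM (what is proved, stated in full; the proofs are below) =====
def Claim_equal_getLongestPostfix : Prop := ∀ (nums : List Int), Dom_getLongestPostfix nums → Pre_getLongestPostfix nums → Spec_getLongestPostfix nums (getLongestPostfix nums)

-- ===== LEMMAS AND PROOFS =====

-- canonical description of the result: length of the alternating-parity run starting here
def rspec : List Int → List Int
  | [] => []
  | [_] => [0]
  | x :: y :: t =>
      (if PySem.Int.mod x 2 = PySem.Int.mod y 2 then 0
       else (rspec (y :: t)).headD 0 + 1) :: rspec (y :: t)

theorem rspec_ne_nil (x : Int) (xs : List Int) : rspec (x :: xs) ≠ [] := by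
  cases xs <;> simp [rspec]


theorem getD_cons_succ' (x : Int) (t : List Int) (j : Nat) :
    (x :: t).getD (j + 1) 0 = t.getD j 0 := by simp [List.getD]

theorem pvFindK_le (nums : List Int) (k : Nat) (h : k ≤ nums.length) :
    pvFindK nums k ≤ nums.length := by
  fun_induction pvFindK with
  | case1 k hlt hc ih => exact ih (by omega)
  | case2 => omega
  | case3 => omega

theorem pvFindK_alt (nums : List Int) (k : Nat) :
    ∀ j, k ≤ j → j < pvFindK nums k →
      PySem.Int.mod (PySem.List.pyGetD nums (j : Int) 0) 2
        ≠ PySem.Int.mod (PySem.List.pyGetD nums ((j : Int) - 1) 0) 2 := by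
  fun_induction pvFindK with
  | case1 k hlt hc ih =>
      intro j hj hjlt
      rcases Nat.eq_or_lt_of_le hj with rfl | hj'
      · exact hc
      · exact ih j (by omega) hjlt
  | case2 k hlt hc => intro j hj hjlt; omega
  | case3 k hlt => intro j hj hjlt; omega

theorem pvFindK_boundary (nums : List Int) (k : Nat) (h : k ≤ nums.length) :
    pvFindK nums k = nums.length ∨
      (pvFindK nums k < nums.length ∧
        PySem.Int.mod (PySem.List.pyGetD nums ((pvFindK nums k : Nat) : Int) 0) 2
          = PySem.Int.mod (PySem.List.pyGetD nums (((pvFindK nums k : Nat) : Int) - 1) 0) 2) := by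
  fun_induction pvFindK with
  | case1 k hlt hc ih => exact ih (by omega)
  | case2 k hlt hc => right; exact ⟨hlt, not_not.mp hc⟩
  | case3 k hlt => left; omega

theorem rspec_segment : ∀ (m : Nat) (xs : List Int), m + 1 ≤ xs.length →
    (∀ j : Nat, 1 ≤ j → j < m + 1 →
      PySem.Int.mod (xs.getD j 0) 2 ≠ PySem.Int.mod (xs.getD (j - 1) 0) 2) →
    (m + 1 = xs.length ∨
      PySem.Int.mod (xs.getD (m + 1) 0) 2 = PySem.Int.mod (xs.getD m 0) 2) →
    rspec xs = PySem.List.pyRange ((m : Int) + 1 - 1) (-1) (-1) ++ rspec (xs.drop (m + 1)) := by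
  intro m
  induction m with
  | zero =>
      intro xs hlen halt hb
      obtain ⟨x, t, rfl⟩ : ∃ x t, xs = x :: t := by
        cases xs with
        | nil => simp at hlen
        | cons a b => exact ⟨a, b, rfl⟩
      · rw [PySem.List.pyRange_neg_one_cons (by norm_num),
            PySem.List.pyRange_neg_one_eq_nil (by norm_num)]
        cases t with
        | nil => simp [rspec]
        | cons y t' =>
            rcases hb with hb | hb
            · simp at hb
            · rw [show (0:Nat) + 1 = 1 from rfl] at hb
              rw [show ((x :: y :: t').getD 1 0) = y from rfl,
                  show ((x :: y :: t').getD 0 0) = x from rfl] at hb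
              simp only [rspec]
              rw [if_pos hb.symm]
              simp
  | succ m ih =>
      intro xs hlen halt hb
      obtain ⟨x, t, rfl⟩ : ∃ x t, xs = x :: t := by
        cases xs with
        | nil => simp at hlen
        | cons a b => exact ⟨a, b, rfl⟩
      · have ht : t.length ≥ m + 1 := by
          simpa using hlen
        obtain ⟨y, t', rfl⟩ : ∃ y t', t = y :: t' := by
          cases t with
          | nil => simp at ht
          | cons a b => exact ⟨a, b, rfl⟩
        have halt' : ∀ j : Nat, 1 ≤ j → j < m + 1 →
            PySem.Int.mod ((y :: t').getD j 0) 2 ≠ PySem.Int.mod ((y :: t').getD (j - 1) 0) 2 := by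
          intro j h1 h2
          have := halt (j + 1) (by omega) (by omega)
          rwa [getD_cons_succ', show j + 1 - 1 = (j - 1) + 1 by omega, getD_cons_succ'] at this
        have hb' : m + 1 = (y :: t').length ∨
            PySem.Int.mod ((y :: t').getD (m + 1) 0) 2 = PySem.Int.mod ((y :: t').getD m 0) 2 := by
          rcases hb with hb | hb
          · left; simp only [List.length_cons] at hb ⊢; omega
          · right
            rwa [show m + 1 + 1 = (m + 1) + 1 from rfl, getD_cons_succ', getD_cons_succ'] at hb
        have ihT := ih (y :: t') (by simpa using ht) halt' hb'
        have h1 := halt 1 (by omega) (by omega)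
        rw [show ((x :: y :: t').getD 1 0) = y from rfl,
            show (1:Nat) - 1 = 0 from rfl,
            show ((x :: y :: t').getD 0 0) = x from rfl] at h1
        have hhead : (rspec (y :: t')).headD 0 = (m : Int) := by
          rw [ihT, PySem.List.pyRange_neg_one_cons (by omega)]
          simp
        rw [show ((m + 1 : Nat) : Int) + 1 - 1 = (((m : Nat) : Int) + 1 - 1) + 1 by push_cast; ring]
        rw [PySem.List.pyRange_neg_one_cons (by omega)]
        rw [show (((m:Nat):Int) + 1 - 1 + 1 - 1) = ((m:Nat):Int) + 1 - 1 by ring]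
        show rspec (x :: y :: t') = (((m:Nat):Int) + 1 - 1 + 1) :: (PySem.List.pyRange (((m:Nat):Int) + 1 - 1) (-1) (-1) ++ rspec ((x :: y :: t').drop (m + 1 + 1)))
        rw [show (x :: y :: t').drop (m + 1 + 1) = (y :: t').drop (m + 1) from rfl, ← ihT]
        simp only [rspec]
        rw [if_neg (fun hco => h1 (by rw [hco]))]
        rw [hhead]
        norm_num

theorem parity_iff (a b : Int) :
    (((PySem.Int.mod a 2 == 0) && (PySem.Int.mod b 2 == 0))
      || (!(PySem.Int.mod a 2 == 0) && !(PySem.Int.mod b 2 == 0))) = true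
    ↔ PySem.Int.mod a 2 = PySem.Int.mod b 2 := by
  rcases PySem.Int.mod_two_eq a with h1 | h1 <;> rcases PySem.Int.mod_two_eq b with h2 | h2 <;>
    rw [h1, h2] <;> decide

theorem A_loop (nums : List Int) : ∀ s : Nat, s < nums.length →
    (PySem.List.pyRange ((s : Int) - 1) (-1) (-1)).foldl
      (fun (st : List Int × Int) (i : Int) =>
        let res := st.1
        let prevNumer := st.2
        let num := PySem.List.pyGetD nums i 0
        let n1Even : Bool := PySem.Int.mod prevNumer 2 == 0
        let n2Even : Bool := PySem.Int.mod num 2 == 0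
        let res' := if (n1Even && n2Even) || (!n1Even && !n2Even)
          then res ++ [0]
          else res ++ [1 + PySem.List.pyGetD res (-1) 0]
        (res', num))
      ((rspec (nums.drop s)).reverse, nums.getD s 0)
    = ((rspec nums).reverse, nums.getD 0 0) := by
  intro s
  induction s with
  | zero =>
      intro _
      rw [PySem.List.pyRange_neg_one_eq_nil (by norm_num)]
      simp
  | succ u ihu =>
      intro hs
      have hu : u < nums.length := by omega
      rw [show ((u + 1 : Nat) : Int) - 1 = (u : Int) by push_cast; ring]
      rw [PySem.List.pyRange_neg_one_cons (by omega), List.foldl_cons]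
      have hdropu : nums.drop u = nums[u] :: nums.drop (u + 1) :=
        List.drop_eq_getElem_cons hu
      have hdropu1 : nums.drop (u + 1) = nums[u + 1] :: nums.drop (u + 2) :=
        List.drop_eq_getElem_cons hs
      have hgetDu : nums.getD u 0 = nums[u] := List.getD_eq_getElem nums 0 hu
      have hgetDu1 : nums.getD (u + 1) 0 = nums[u + 1] := List.getD_eq_getElem nums 0 hs
      have hstep :
          (fun (st : List Int × Int) (i : Int) =>
            let res := st.1
            let prevNumer := st.2
            let num := PySem.List.pyGetD nums i 0
            let n1Even : Bool := PySem.Int.mod prevNumer 2 == 0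
            let n2Even : Bool := PySem.Int.mod num 2 == 0
            let res' := if (n1Even && n2Even) || (!n1Even && !n2Even)
              then res ++ [0]
              else res ++ [1 + PySem.List.pyGetD res (-1) 0]
            (res', num))
          ((rspec (nums.drop (u + 1))).reverse, nums.getD (u + 1) 0) ((u : Int))
          = ((rspec (nums.drop u)).reverse, nums.getD u 0) := by
        simp only [PySem.List.pyGetD_natCast]
        rw [hgetDu, hgetDu1, hdropu, hdropu1]
        by_cases hpar : PySem.Int.mod nums[u + 1] 2 = PySem.Int.mod nums[u] 2
        · have hcond : (((PySem.Int.mod nums[u + 1] 2 == 0) && (PySem.Int.mod nums[u] 2 == 0))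
              || (!(PySem.Int.mod nums[u + 1] 2 == 0) && !(PySem.Int.mod nums[u] 2 == 0))) = true :=
            (parity_iff _ _).mpr hpar
          simp only [hcond, if_true]
          simp only [rspec]
          rw [if_pos hpar.symm]
          simp
        · have hcond : (((PySem.Int.mod nums[u + 1] 2 == 0) && (PySem.Int.mod nums[u] 2 == 0))
              || (!(PySem.Int.mod nums[u + 1] 2 == 0) && !(PySem.Int.mod nums[u] 2 == 0))) = false :=
            Bool.eq_false_iff.mpr (fun hc => hpar ((parity_iff _ _).mp hc))
          simp only [hcond, if_false, Bool.false_eq_true]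
          simp only [rspec]
          rw [if_neg (fun hco => hpar hco.symm)]
          obtain ⟨h0, rest, hr⟩ : ∃ h0 rest, rspec (nums[u + 1] :: nums.drop (u + 2)) = h0 :: rest := by
            cases hh : rspec (nums[u + 1] :: nums.drop (u + 2)) with
            | nil => exact absurd hh (rspec_ne_nil _ _)
            | cons a b => exact ⟨a, b, rfl⟩
          rw [hr]
          rw [List.reverse_cons, PySem.List.pyGetD_neg_one_append_singleton]
          simp [add_comm]
      exact (congrArg (fun z => List.foldl _ z (PySem.List.pyRange ((u : Int) - 1) (-1) (-1))) hstep).trans (ihu hu)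

theorem A_eq_rspec (nums : List Int) (h : nums ≠ []) : getLongestPostfix nums = rspec nums := by
  have hlen : 1 ≤ nums.length := by
    cases nums with
    | nil => exact absurd rfl h
    | cons a b => simp
  have hlast : PySem.List.pyGet? nums (-1) = some (nums.getLast h) := by
    rw [PySem.List.pyGet?_neg_one, List.getLast?_eq_getLast_of_ne_nil h]
  have hrange : (PySem.List.pyRange 0 (PySem.List.len nums - 1) 1).reverse
      = PySem.List.pyRange (((nums.length - 1 : Nat) : Int) - 1) (-1) (-1) := by
    rw [PySem.List.pyRange_neg_one_eq_reverse, PySem.List.len_eq]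
    congr 2; omega
  have hinit1 : nums.drop (nums.length - 1) = [nums.getLast h] := by
    rw [List.drop_eq_getElem_cons (by omega : nums.length - 1 < nums.length)]
    rw [show nums.length - 1 + 1 = nums.length by omega, List.drop_length]
    rw [List.getLast_eq_getElem]
  have hinit2 : nums.getD (nums.length - 1) 0 = nums.getLast h := by
    rw [List.getD_eq_getElem nums 0 (by omega : nums.length - 1 < nums.length),
        List.getLast_eq_getElem]
  simp only [getLongestPostfix, hlast]
  rw [hrange]
  have hloop := A_loop nums (nums.length - 1) (by omega)
  rw [hinit1, hinit2] at hloop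
  have : (rspec [nums.getLast h]).reverse = [(0 : Int)] := by simp [rspec]
  rw [this] at hloop
  rw [hloop]
  simp


theorem pyGetD_pred (nums : List Int) (j : Nat) (hj : 1 ≤ j) :
    PySem.List.pyGetD nums ((j : Int) - 1) 0 = nums.getD (j - 1) 0 := by
  rw [show ((j : Int) - 1) = ((j - 1 : Nat) : Int) by omega, PySem.List.pyGetD_natCast]

theorem getD_drop (l : List Int) (s j : Nat) (h : s + j < l.length) :
    (l.drop s).getD j 0 = l.getD (s + j) 0 := by
  rw [List.getD_eq_getElem _ _ (by simp; omega), List.getD_eq_getElem _ _ h]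
  simp [List.getElem_drop]

theorem pvAltLoop_eq (nums : List Int) (start : Nat) (res : List Int) :
    pvAltLoop nums start res = res ++ rspec (nums.drop start) := by
  fun_induction pvAltLoop with
  | case1 start res h k ih =>
      have hk1 : start + 1 ≤ k := pvFindK_ge nums (start + 1)
      have hkle : k ≤ nums.length := pvFindK_le nums (start + 1) (by omega)
      obtain ⟨m, hm⟩ : ∃ m, k = start + m + 1 := ⟨k - start - 1, by omega⟩
      have hseg := rspec_segment m (nums.drop start)
        (by simp [List.length_drop]; omega)
        (fun j h1 hj => by
          have := pvFindK_alt nums (start + 1) (start + j) (by omega) (by omega)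
          rw [PySem.List.pyGetD_natCast, pyGetD_pred nums (start + j) (by omega)] at this
          rwa [getD_drop nums start j (by omega),
               getD_drop nums start (j - 1) (by omega),
               show start + (j - 1) = start + j - 1 by omega])
        (by
          rcases pvFindK_boundary nums (start + 1) (by omega) with hbd | ⟨hlt, hbd⟩
          · left; simp [List.length_drop]; omega
          · right
            rw [PySem.List.pyGetD_natCast, pyGetD_pred nums _ (by omega)] at hbd
            rw [getD_drop nums start (m + 1) (by omega),
                getD_drop nums start m (by omega),
                show start + (m + 1) = k by omega, show start + m = k - 1 by omega]
            exact hbd)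
      rw [ih, List.append_assoc]
      congr 1
      rw [List.drop_drop] at hseg
      rw [show ((k : Int) - (start : Int) - 1) = ((m : Nat) : Int) + 1 - 1 by omega]
      rw [show nums.drop k = nums.drop (start + (m + 1)) by rw [hm, Nat.add_assoc]]
      exact hseg.symm
  | case2 start res h =>
      rw [List.drop_eq_nil_of_le (by omega)]
      simp [rspec]

theorem B_eq_rspec (nums : List Int) : getLongestPostfix_alt nums = rspec nums := by
  rw [getLongestPostfix_alt, pvAltLoop_eq]
  simp

-- ===== VERDICT (by name: the statement is the Claim_ definition above) =====
theorem getLongestPostfix_spec : Claim_equal_getLongestPostfix := by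
  intro nums _ hpre
  unfold Spec_getLongestPostfix
  rw [A_eq_rspec nums hpre, B_eq_rspec]
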